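-- pv_equiv track=rewrite | github.com/wyz-2015/c2json-editor-qt | maps_editor.py | __is_value_dict__
-- ===== SOURCE A (Python) =====
-- def __is_value_dict__(_dict: dict) -> int:
--     """
--     struct typeCode
--     {
--         unsigned int isValueDict: 1;
--         unsigned int isValueDictList: 1;
--     };
--     """
--     typeCode = 0
--     for k in _dict:
--         if (type(k) == type(str())):
--             if (k == "varNameList"):
--                 typeCode |= 0b01
--             elif (k.endswith("_current")):
--                 typeCode |= 0b10
--
--     return typeCode
-- ===== SOURCE B (Python) =====
-- def __is_value_dict__(_dict: dict) -> int:
--     bit0 = 0b01 if any(type(k) is str and k == "varNameList" for k in _dict) else 0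
--     bit1 = 0b10 if any(type(k) is str and k.endswith("_current") for k in _dict) else 0
--     return bit0 | bit1
-- ===== Notes on version B (the rewrite author's own statement) =====
-- stated objective: simpler
-- what changed: Replaced the single stateful accumulation loop with two independent any() existence passes (one per bit) combined with a bitwise OR.
import Mathlib
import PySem

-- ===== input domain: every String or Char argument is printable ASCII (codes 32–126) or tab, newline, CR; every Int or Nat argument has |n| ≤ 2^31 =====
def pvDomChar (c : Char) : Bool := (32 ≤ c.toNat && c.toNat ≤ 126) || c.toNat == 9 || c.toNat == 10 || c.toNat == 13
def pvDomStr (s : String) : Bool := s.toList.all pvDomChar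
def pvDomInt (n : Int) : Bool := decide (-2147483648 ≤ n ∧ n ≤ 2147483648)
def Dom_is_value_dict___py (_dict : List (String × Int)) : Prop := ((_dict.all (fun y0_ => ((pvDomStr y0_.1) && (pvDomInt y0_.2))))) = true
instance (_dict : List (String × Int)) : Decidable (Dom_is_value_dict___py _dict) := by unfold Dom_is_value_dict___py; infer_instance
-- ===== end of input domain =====

-- B computes the two type bits by two independent existence passes instead of A's single
-- stateful accumulation loop (objective: simpler decomposition; same cost).
-- ===== PORT A =====
-- Port of A: one loop, accumulator typeCode updated with |= (the `type(k) == type(str())`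
-- guard is always true here since every key is a String; `|` on Python ints is Int.lor).
def pvStep (typeCode : Int) (kv : String × Int) : Int :=
  if kv.1 == "varNameList" then Int.lor typeCode 1
  else if PySem.Str.endswith kv.1 "_current" then Int.lor typeCode 2
  else typeCode

def is_value_dict___py (_dict : List (String × Int)) : Int :=
  _dict.foldl pvStep 0

-- ===== PORT B =====
-- Port of B: two independent existence passes, one per bit, OR-ed together.
def is_value_dict___py_alt (_dict : List (String × Int)) : Int :=
  Int.lor (if _dict.any (fun kv => kv.1 == "varNameList") then (1 : Int) else 0)
          (if _dict.any (fun kv => PySem.Str.endswith kv.1 "_current") then (2 : Int) else 0)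

-- ===== PRECONDITION & SPEC =====
def Spec_is_value_dict___py (_dict : List (String × Int)) (out : Int) : Prop := out = is_value_dict___py_alt _dict
instance (_dict : List (String × Int)) (out : Int) : Decidable (Spec_is_value_dict___py _dict out) := by unfold Spec_is_value_dict___py; infer_instance

-- ===== CLAIM (what is proved, stated in full; the proofs are below) =====
def Claim_equal_is_value_dict___py : Prop := ∀ (_dict : List (String × Int)), Dom_is_value_dict___py _dict → Spec_is_value_dict___py _dict (is_value_dict___py _dict)

-- ===== LEMMAS AND PROOFS =====

-- ===== VERDICT (by name: the statement is the Claim_ definition above) =====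
-- Loop invariant: the accumulator only ever holds 0,1,2,3, and folding from tc
-- ORs in exactly the two existence bits that B computes.
theorem pvStep_mem (tc : Int) (kv : String × Int)
    (h : tc = 0 ∨ tc = 1 ∨ tc = 2 ∨ tc = 3) :
    pvStep tc kv = 0 ∨ pvStep tc kv = 1 ∨ pvStep tc kv = 2 ∨ pvStep tc kv = 3 := by
  unfold pvStep
  rcases h with h | h | h | h <;> subst h <;> split_ifs <;> decide

theorem pvLoop (d : List (String × Int)) :
    ∀ tc : Int, (tc = 0 ∨ tc = 1 ∨ tc = 2 ∨ tc = 3) →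
      d.foldl pvStep tc = Int.lor tc (is_value_dict___py_alt d) := by
  induction d with
  | nil =>
    intro tc htc
    rcases htc with h | h | h | h <;> subst h <;> decide
  | cons kv r ih =>
    intro tc htc
    rw [List.foldl_cons, ih (pvStep tc kv) (pvStep_mem tc kv htc)]
    cases hv : (kv.1 == "varNameList") with
    | true =>
      have hk : kv.1 = "varNameList" := by exact beq_iff_eq.mp hv
      have he : PySem.Str.endswith kv.1 "_current" = false := by rw [hk]; decide
      rcases htc with h | h | h | h <;> subst h <;>
        cases h2 : r.any (fun kv => PySem.Str.endswith kv.1 "_current") <;>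
        cases h1 : r.any (fun kv => kv.1 == "varNameList") <;>
        simp only [pvStep, is_value_dict___py_alt, List.any_cons, hv, he, h1, h2,
          Bool.false_or, Bool.true_or, Bool.or_false, Bool.or_true,
          if_true, if_false, Bool.false_eq_true, Bool.true_eq_false, ite_true, ite_false] <;>
        decide
    | false =>
      cases he : PySem.Str.endswith kv.1 "_current" <;>
        rcases htc with h | h | h | h <;> subst h <;>
        cases h2 : r.any (fun kv => PySem.Str.endswith kv.1 "_current") <;>
        cases h1 : r.any (fun kv => kv.1 == "varNameList") <;>
        simp only [pvStep, is_value_dict___py_alt, List.any_cons, hv, he, h1, h2,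
          Bool.false_or, Bool.true_or, Bool.or_false, Bool.or_true,
          if_true, if_false, Bool.false_eq_true, Bool.true_eq_false, ite_true, ite_false] <;>
        decide

theorem is_value_dict___py_spec : Claim_equal_is_value_dict___py := by
  intro d _
  unfold Spec_is_value_dict___py is_value_dict___py
  rw [pvLoop d 0 (Or.inl rfl)]
  cases h1 : d.any (fun kv => kv.1 == "varNameList") <;>
    cases h2 : d.any (fun kv => PySem.Str.endswith kv.1 "_current") <;>
    simp only [is_value_dict___py_alt, h1, h2, ite_true, ite_false,
      Bool.false_eq_true, Bool.true_eq_false] <;> decide
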